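-- pv_equiv track=rewrite | github.com/marc-infante/SD | matrices.py | CalcNumCasillas
-- ===== SOURCE A (Python) =====
-- M = 1000
--
-- L = 1000
--
-- def CalcNumCasillas(workers):
--     iterdata = []
--     if workers > M*L:
--         workers = M*L
--     casilla_ini = int(0)
--     num_casillas_pred = int((M * L)/workers)
--     resto = int((M * L) % workers)
--     for i in range(workers):
--         if resto > 0:
--             iterdata.append([int(casilla_ini), int(num_casillas_pred + 1)])
--             resto -= 1
--             casilla_ini += num_casillas_pred + 1
--         else:
--             iterdata.append([int(casilla_ini), int(num_casillas_pred)])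
--             casilla_ini += num_casillas_pred
--
--     return iterdata
-- ===== SOURCE B (Python) =====
-- M = 1000
--
-- L = 1000
--
-- def CalcNumCasillas(workers):
--     total = M * L
--     if workers > total:
--         workers = total
--     pred = int(total / workers)
--     resto = int(total % workers)
--     return [[i * pred + min(i, resto), pred + (1 if i < resto else 0)]
--             for i in range(workers)]
-- ===== Notes on version B (the rewrite author's own statement) =====
-- stated objective: simpler
-- what changed: Replaces A's threaded casilla_ini/resto-decrement state machine with a stateless comprehension computing each worker's interval directly from its index (start = i*pred + min(i, resto), count = pred + [i < resto]).
-- outside the precondition, e.g. on CalcNumCasillas(0): A raises ZeroDivisionError, B raises ZeroDivisionError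
import Mathlib
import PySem

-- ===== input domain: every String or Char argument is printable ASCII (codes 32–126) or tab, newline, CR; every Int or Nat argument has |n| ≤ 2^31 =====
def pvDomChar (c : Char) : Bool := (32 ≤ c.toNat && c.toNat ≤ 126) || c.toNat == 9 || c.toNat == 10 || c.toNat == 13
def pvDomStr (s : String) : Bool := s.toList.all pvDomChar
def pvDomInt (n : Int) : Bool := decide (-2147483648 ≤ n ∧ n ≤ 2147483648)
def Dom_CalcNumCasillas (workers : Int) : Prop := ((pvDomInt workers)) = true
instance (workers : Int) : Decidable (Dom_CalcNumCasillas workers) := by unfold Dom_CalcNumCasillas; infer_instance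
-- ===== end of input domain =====

-- B replaces A's running accumulator/resto-decrement loop with a stateless closed form per index ("simpler"); return values proved equal for workers ≠ 0.

-- ===== PORT A =====
-- A's loop body, threading (iterdata, casilla_ini, resto); num_casillas_pred is fixed.
def pvStepA (pred : Int) (s : List (List Int) × Int × Int) (_ : Int) : List (List Int) × Int × Int :=
  if s.2.2 > 0 then (s.1 ++ [[s.2.1, pred + 1]], s.2.1 + (pred + 1), s.2.2 - 1)
  else (s.1 ++ [[s.2.1, pred]], s.2.1 + pred, s.2.2)

def CalcNumCasillas (workers : Int) : List (List Int) :=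
  let w := if workers > 1000 * 1000 then 1000 * 1000 else workers
  -- int((M*L)/w): Python true division then int() truncates toward zero; exact as
  -- PySem.Int.truncdiv since |1000000| and |w| are < 2^53 on Dom
  let pred := PySem.Int.truncdiv (1000 * 1000) w
  let resto := PySem.Int.mod (1000 * 1000) w
  ((PySem.List.pyRange 0 w 1).foldl (pvStepA pred) ([], 0, resto)).1

-- ===== PORT B =====
def CalcNumCasillas_alt (workers : Int) : List (List Int) :=
  let w := if workers > 1000 * 1000 then 1000 * 1000 else workers
  let pred := PySem.Int.truncdiv (1000 * 1000) w
  let resto := PySem.Int.mod (1000 * 1000) w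
  (PySem.List.pyRange 0 w 1).map
    (fun i => [i * pred + min i resto, pred + if i < resto then 1 else 0])

-- ===== PRECONDITION & SPEC =====
-- workers = 0 raises ZeroDivisionError in A (and in B); it is the only excluded input.
def Pre_CalcNumCasillas (workers : Int) : Prop := workers ≠ 0
instance (workers : Int) : Decidable (Pre_CalcNumCasillas workers) := by unfold Pre_CalcNumCasillas; infer_instance
def pvWitness_CalcNumCasillas : Int := 7

def Spec_CalcNumCasillas (workers : Int) (out : List (List Int)) : Prop := out = CalcNumCasillas_alt workers
instance (workers : Int) (out : List (List Int)) : Decidable (Spec_CalcNumCasillas workers out) := by unfold Spec_CalcNumCasillas; infer_instance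

-- ===== CLAIM (what is proved, stated in full; the proofs are below) =====
def Claim_equal_CalcNumCasillas : Prop := ∀ (workers : Int), Dom_CalcNumCasillas workers → Pre_CalcNumCasillas workers → Spec_CalcNumCasillas workers (CalcNumCasillas workers)

-- ===== LEMMAS AND PROOFS =====

-- Loop invariant: A's fold over pyRange a (a+n) 1, started at column c with resto r ≥ 0,
-- appends exactly B's closed-form intervals shifted by a and c.
lemma pvFoldA_eq (pred : Int) (n : Nat) : ∀ (a c r : Int) (acc : List (List Int)), 0 ≤ r →
    ((PySem.List.pyRange a (a + n) 1).foldl (pvStepA pred) (acc, c, r)).1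
      = acc ++ (PySem.List.pyRange a (a + n) 1).map
          (fun i => [c + (i - a) * pred + min (i - a) r, pred + if i - a < r then 1 else 0]) := by
  induction n with
  | zero =>
      intro a c r acc _
      rw [PySem.List.pyRange_one_eq_nil (by omega : a + ((0:Nat):Int) ≤ a)]
      simp
  | succ m ih =>
      intro a c r acc hr
      have hlt : a < a + ((m+1 : Nat) : Int) := by push_cast; omega
      rw [PySem.List.pyRange_one_cons hlt]
      simp only [List.foldl_cons, List.map_cons]
      rw [show a + ((m+1 : Nat) : Int) = (a+1) + (m : Nat) by push_cast; ring]
      by_cases hpos : r > 0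
      · rw [show pvStepA pred (acc, c, r) a
              = (acc ++ [[c, pred + 1]], c + (pred + 1), r - 1) by
            simp [pvStepA, hpos]]
        rw [ih (a+1) (c + (pred+1)) (r-1) _ (by omega)]
        rw [List.append_assoc]
        congr 1
        rw [List.singleton_append]
        congr 1
        · have h0 : min (a - a) r = 0 := by omega
          rw [h0, if_pos (by omega)]
          norm_num
        · apply List.map_congr_left
          intro i hi
          have hia : a + 1 ≤ i := (PySem.List.mem_pyRange_one.mp hi).1
          have h1 : c + (pred + 1) + (i - (a+1)) * pred + min (i - (a+1)) (r-1)
                  = c + (i - a) * pred + min (i - a) r := by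
            rcases le_total (i - (a+1)) (r-1) with h | h
            · rw [min_eq_left h, min_eq_left (by omega)]; ring
            · rw [min_eq_right h, min_eq_right (by omega)]; ring
          have h2 : (if i - (a+1) < r - 1 then (1:Int) else 0)
                  = (if i - a < r then 1 else 0) := by
            by_cases hc : i - (a+1) < r - 1
            · rw [if_pos hc, if_pos (by omega)]
            · rw [if_neg hc, if_neg (by omega)]
          rw [h1, h2]
      · have hr0 : r = 0 := by omega
        subst hr0
        rw [show pvStepA pred (acc, c, 0) a = (acc ++ [[c, pred]], c + pred, 0) by
            simp [pvStepA]]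
        rw [ih (a+1) (c + pred) 0 _ le_rfl]
        rw [List.append_assoc]
        congr 1
        rw [List.singleton_append]
        congr 1
        · have h0 : min (a - a) (0:Int) = 0 := by omega
          rw [h0, if_neg (by omega)]
          norm_num
        · apply List.map_congr_left
          intro i hi
          have hia : a + 1 ≤ i := (PySem.List.mem_pyRange_one.mp hi).1
          rw [min_eq_right (by omega : (0:Int) ≤ i - (a+1)),
              min_eq_right (by omega : (0:Int) ≤ i - a)]
          rw [if_neg (by omega), if_neg (by omega)]
          ring_nf

-- pvFoldA_eq specialised to start 0 (the shape both ports use).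
lemma pvFoldA_eq0 (pred : Int) (n : Nat) (r : Int) (hr : 0 ≤ r) :
    ((PySem.List.pyRange 0 (n : Int) 1).foldl (pvStepA pred) ([], 0, r)).1
      = (PySem.List.pyRange 0 (n : Int) 1).map
          (fun i => [i * pred + min i r, pred + if i < r then 1 else 0]) := by
  have h := pvFoldA_eq pred n 0 0 r [] hr
  rw [show (0:Int) + (n:Int) = (n:Int) by ring] at h
  rw [h, List.nil_append]
  apply List.map_congr_left
  intro i _
  norm_num

-- ===== VERDICT (by name: the statement is the Claim_ definition above) =====
theorem CalcNumCasillas_spec : Claim_equal_CalcNumCasillas := by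
  intro workers _ hw
  unfold Spec_CalcNumCasillas CalcNumCasillas CalcNumCasillas_alt
  dsimp only
  set w := if workers > 1000 * 1000 then 1000 * 1000 else workers with hwdef
  by_cases hpos : 0 < w
  · have hr : 0 ≤ PySem.Int.mod (1000 * 1000) w := PySem.Int.mod_nonneg _ hpos
    have hcast : w = ((w.toNat : Nat) : Int) := by omega
    rw [hcast]
    exact pvFoldA_eq0 _ _ _ (hcast ▸ hr)
  · have hle : w ≤ 0 := by omega
    rw [PySem.List.pyRange_one_eq_nil hle]
    simp
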